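-- pv_equiv track=rewrite | github.com/pp2daniyar/Labki | lab3/functions1.py | has
-- ===== SOURCE A (Python) =====
-- def has(nums):
--     for num in nums:
--         if num == 0:
--             for i in range(nums.index(num) + 1, len(nums)):
--                 if nums[i] == 0:
--                     for j in range(i + 1, len(nums)):
--                         if nums[j] == 7:
--                             return True
--     return False
-- ===== SOURCE B (Python) =====
-- def has(nums):
--     # Single linear pass: count zeros seen (capped at 2); once two zeros
--     # have been seen, any later 7 completes the pattern.
--     state = 0
--     for x in nums:
--         if state == 2 and x == 7:
--             return True
--         if x == 0 and state < 2:
--             state += 1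
--     return False
-- ===== Notes on version B (the rewrite author's own statement) =====
-- stated objective: alternative
-- what changed: Replaced the triply nested index scans (with a repeated list.index call) by a single left-to-right pass maintaining a 3-state automaton (zeros seen, capped at 2, then watch for a 7).
import Mathlib
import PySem

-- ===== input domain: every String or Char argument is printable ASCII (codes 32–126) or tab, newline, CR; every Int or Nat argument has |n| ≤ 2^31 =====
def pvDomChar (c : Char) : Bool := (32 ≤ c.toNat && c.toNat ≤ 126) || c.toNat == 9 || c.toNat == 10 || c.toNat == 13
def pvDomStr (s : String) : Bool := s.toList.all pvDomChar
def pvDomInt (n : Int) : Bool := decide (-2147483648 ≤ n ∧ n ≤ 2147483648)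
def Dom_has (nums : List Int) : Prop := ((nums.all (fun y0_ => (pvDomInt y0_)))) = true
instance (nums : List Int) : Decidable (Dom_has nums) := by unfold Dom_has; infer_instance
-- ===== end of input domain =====

-- B replaces A's triply nested index scans by one linear pass with a 3-state automaton (objective: alternative).


-- ===== PORT A =====
-- Literal transliteration: each 'for … return True' loop is an .any over the loop's
-- iterable; nums.index(num) is PySem.List.index? (always 'some' here since num ∈ nums,
-- so the 'none' arm is unreachable); nums[i] on an in-range index is pyGetD (default never used).
def has (nums : List Int) : Bool :=
  nums.any (fun num =>
    num == 0 &&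
      (match PySem.List.index? nums num with
       | some idx =>
         (PySem.List.pyRange ((idx : Int) + 1) (nums.length : Int) 1).any (fun i =>
           PySem.List.pyGetD nums i 0 == 0 &&
             (PySem.List.pyRange (i + 1) (nums.length : Int) 1).any (fun j =>
               PySem.List.pyGetD nums j 0 == 7))
       | none => false))

-- ===== PORT B =====
-- state = number of zeros seen so far, capped at 2; at state 2 a 7 completes the pattern.
def hasGo (l : List Int) (state : Nat) : Bool :=
  match l with
  | [] => false
  | x :: r =>
    if state == 2 && x == 7 then true
    else hasGo r (if x == 0 && state < 2 then state + 1 else state)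

def has_alt (nums : List Int) : Bool := hasGo nums 0

-- ===== PRECONDITION & SPEC =====
def Spec_has (nums : List Int) (out : Bool) : Prop := out = has_alt nums
instance (nums : List Int) (out : Bool) : Decidable (Spec_has nums out) := by unfold Spec_has; infer_instance

-- ===== CLAIM (what is proved, stated in full; the proofs are below) =====
def Claim_equal_has : Prop := ∀ (nums : List Int), Dom_has nums → Spec_has nums (has nums)

-- ===== LEMMAS AND PROOFS =====

-- "a 7 occurs in l"
def seven (l : List Int) : Bool := l.any (· == 7)

-- "a 0 occurs in l with a 7 strictly after it"
def zs (l : List Int) : Bool :=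
  match l with
  | [] => false
  | x :: r => if x == 0 then seven r else zs r

-- A's innermost j-loop, scanning l[i+1:] for a 7
def Jl (l : List Int) (i : Int) : Bool :=
  (PySem.List.pyRange (i + 1) (l.length : Int) 1).any (fun j => PySem.List.pyGetD l j 0 == 7)

-- A's middle i-loop, scanning l[s+1:] for a 0 followed by a 7
def Il (l : List Int) (s : Int) : Bool :=
  (PySem.List.pyRange (s + 1) (l.length : Int) 1).any (fun i => PySem.List.pyGetD l i 0 == 0 && Jl l i)

lemma pyRange_shift_any (a b : Int) (g : Int → Bool) :
    (PySem.List.pyRange (a + 1) (b + 1) 1).any g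
      = (PySem.List.pyRange a b 1).any (fun i => g (i + 1)) := by
  rw [PySem.List.pyRange_one, PySem.List.pyRange_one]
  have h : (b + 1 - (a + 1)) = b - a := by ring
  rw [h, List.any_map, List.any_map]
  refine List.any_congr rfl (fun k => ?_)
  simp only [Function.comp_apply]
  rw [show a + 1 + (k : Int) = a + k + 1 from by ring]

lemma pyGetD_cons_succ (x : Int) (l : List Int) (i : Int) (h : 0 ≤ i) (d : Int) :
    PySem.List.pyGetD (x :: l) (i + 1) d = PySem.List.pyGetD l i d := by
  obtain ⟨n, rfl⟩ := Int.eq_ofNat_of_zero_le h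
  have : ((n : Int) + 1) = ((n + 1 : Nat) : Int) := by push_cast; ring
  rw [this, PySem.List.pyGetD_natCast, PySem.List.pyGetD_natCast, List.getD_cons_succ]

lemma Jl_cons (x : Int) (l : List Int) (i : Int) (hi : 0 ≤ i) :
    Jl (x :: l) (i + 1) = Jl l i := by
  unfold Jl
  have hlen : ((x :: l).length : Int) = (l.length : Int) + 1 := by
    simp [List.length_cons]
  rw [hlen]
  have h1 : (i + 1 + 1) = (i + 1) + 1 := by ring
  rw [h1, pyRange_shift_any]
  apply PySem.List.any_congr_mem
  intro j hj
  have hb := (PySem.List.mem_pyRange_one.mp hj).1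
  rw [pyGetD_cons_succ x l j (by omega) 0]

lemma Jl_zero_cons (x : Int) (l : List Int) :
    Jl (x :: l) 0 = seven l := by
  unfold Jl
  have hlen : ((x :: l).length : Int) = (l.length : Int) + 1 := by
    simp [List.length_cons]
  rw [hlen]
  have h1 : (0 + 1 : Int) = 0 + 1 := rfl
  rw [show (0 + 1 : Int) = (0 : Int) + 1 from rfl, pyRange_shift_any]
  have hcg : (PySem.List.pyRange 0 (l.length : Int) 1).any
        (fun j => PySem.List.pyGetD (x :: l) (j + 1) 0 == 7)
      = (PySem.List.pyRange 0 (l.length : Int) 1).any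
        (fun j => PySem.List.pyGetD l j 0 == 7) := by
    apply PySem.List.any_congr_mem
    intro j hj
    have hb := (PySem.List.mem_pyRange_one.mp hj).1
    rw [pyGetD_cons_succ x l j (by omega) 0]
  rw [hcg]
  have hm := PySem.List.map_pyGetD_pyRange_zero' (xs := l) (d := (0 : Int))
  calc (PySem.List.pyRange 0 (l.length : Int) 1).any (fun j => PySem.List.pyGetD l j 0 == 7)
      = ((PySem.List.pyRange 0 (l.length : Int) 1).map (fun j => PySem.List.pyGetD l j 0)).any (· == 7) := by
        rw [List.any_map]; rfl
    _ = l.any (· == 7) := by rw [hm]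
    _ = seven l := rfl

lemma Il_cons (x : Int) (l : List Int) (s : Int) (hs : 0 ≤ s) :
    Il (x :: l) (s + 1) = Il l s := by
  unfold Il
  have hlen : ((x :: l).length : Int) = (l.length : Int) + 1 := by
    simp [List.length_cons]
  rw [hlen, show (s + 1 + 1 : Int) = (s + 1) + 1 from by ring, pyRange_shift_any]
  apply PySem.List.any_congr_mem
  intro i hi
  have hb := (PySem.List.mem_pyRange_one.mp hi).1
  rw [pyGetD_cons_succ x l i (by omega) 0, Jl_cons x l i (by omega)]

-- G l = A's i-loop started at index 0 of l (i.e. Il (x::l) 0 shifted onto l)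
def Gl (l : List Int) : Bool :=
  (PySem.List.pyRange 0 (l.length : Int) 1).any (fun i => PySem.List.pyGetD l i 0 == 0 && Jl l i)

lemma Il_zero_cons (x : Int) (l : List Int) : Il (x :: l) 0 = Gl l := by
  unfold Il Gl
  have hlen : ((x :: l).length : Int) = (l.length : Int) + 1 := by
    simp [List.length_cons]
  rw [hlen, show (0 + 1 : Int) = (0 : Int) + 1 from rfl, pyRange_shift_any]
  apply PySem.List.any_congr_mem
  intro i hi
  have hb := (PySem.List.mem_pyRange_one.mp hi).1
  rw [pyGetD_cons_succ x l i (by omega) 0, Jl_cons x l i (by omega)]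

lemma zs_imp_seven (l : List Int) (h : zs l = true) : seven l = true := by
  induction l with
  | nil => simp [zs] at h
  | cons x r ih =>
    rw [zs] at h
    by_cases h0 : x == 0
    · rw [if_pos h0] at h
      unfold seven at h ⊢
      rw [List.any_cons, h, Bool.or_true]
    · rw [if_neg h0] at h
      have h' := ih h
      unfold seven at h' ⊢
      rw [List.any_cons, h', Bool.or_true]

lemma Gl_eq_zs (l : List Int) : Gl l = zs l := by
  induction l with
  | nil =>
    simp [Gl, zs, PySem.List.pyRange_one_eq_nil (by norm_num : (0:Int) ≤ 0)]
  | cons x r ih =>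
    unfold Gl
    have hlen : ((x :: r).length : Int) = (r.length : Int) + 1 := by
      simp [List.length_cons]
    rw [hlen]
    have hpos : (0 : Int) < (r.length : Int) + 1 := by positivity
    rw [PySem.List.pyRange_one_cons hpos, List.any_cons]
    have hhead : (PySem.List.pyGetD (x :: r) 0 0 == 0 && Jl (x :: r) 0)
        = (x == 0 && seven r) := by
      rw [PySem.List.pyGetD_zero_cons, Jl_zero_cons]
    have htail : (PySem.List.pyRange (0 + 1) ((r.length : Int) + 1) 1).any
          (fun i => PySem.List.pyGetD (x :: r) i 0 == 0 && Jl (x :: r) i) = Gl r := by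
      rw [show ((0 : Int) + 1) = (0 : Int) + 1 from rfl, pyRange_shift_any]
      have : (PySem.List.pyRange 0 (r.length : Int) 1).any
            (fun i => PySem.List.pyGetD (x :: r) (i + 1) 0 == 0 && Jl (x :: r) (i + 1))
          = (PySem.List.pyRange 0 (r.length : Int) 1).any
            (fun i => PySem.List.pyGetD r i 0 == 0 && Jl r i) := by
        apply PySem.List.any_congr_mem
        intro i hi
        have hb := (PySem.List.mem_pyRange_one.mp hi).1
        rw [pyGetD_cons_succ x r i (by omega) 0, Jl_cons x r i (by omega)]
      rw [this]; rfl
    rw [hhead, htail, ih, zs]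
    by_cases h0 : x == 0
    · rw [if_pos h0]
      cases h7 : seven r
      · cases hz : zs r
        · simp [h0]
        · exact absurd (zs_imp_seven r hz) (by simp [h7])
      · simp [h0]
    · rw [if_neg h0]
      simp [h0]

lemma hasGo_two (l : List Int) : hasGo l 2 = seven l := by
  induction l with
  | nil => rfl
  | cons x r ih =>
    rw [hasGo, seven, List.any_cons]
    by_cases h7 : x == 7
    · simp [h7]
    · have : ((2 : Nat) == 2 && x == 7) = false := by simp [h7]
      rw [this, if_neg (by simp)]
      have hupd : (if x == 0 && decide (2 < 2) then 2 + 1 else 2) = 2 := by simp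
      rw [hupd, ih]
      simp [seven, h7]

lemma hasGo_one (l : List Int) : hasGo l 1 = zs l := by
  induction l with
  | nil => rfl
  | cons x r ih =>
    rw [hasGo, zs]
    have hcond : ((1 : Nat) == 2 && x == 7) = false := by simp
    rw [hcond, if_neg (by simp)]
    by_cases h0 : x == 0
    · have : (if x == 0 && decide (1 < 2) then 1 + 1 else 1) = 2 := by simp [h0]
      rw [this, if_pos h0, hasGo_two]
    · have : (if x == 0 && decide (1 < 2) then 1 + 1 else 1) = 1 := by simp [h0]
      rw [this, if_neg h0, ih]

lemma any_and_const (l : List Int) (p : Int → Bool) (c : Bool) :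
    l.any (fun y => p y && c) = (l.any p && c) := by
  cases c <;> simp

-- A's outer-loop body, written with Il
lemma has_eq_any (nums : List Int) :
    has nums = nums.any (fun num =>
      num == 0 &&
        (match PySem.List.index? nums num with
         | some idx => Il nums (idx : Int)
         | none => false)) := rfl

lemma has_eq_hasGo (l : List Int) : has l = hasGo l 0 := by
  induction l with
  | nil => rfl
  | cons x r ih =>
    rw [has_eq_any, List.any_cons]
    rw [hasGo]
    have hcond : ((0 : Nat) == 2 && x == 7) = false := by simp
    rw [hcond, if_neg (by simp)]
    by_cases h0 : x == 0
    · -- x = 0: every zero's index is 0; the whole thing collapses to Il (x::r) 0 = Gl r = zs r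
      have hx0 : x = 0 := by simpa using h0
      subst hx0
      have hupd : (if (0 : Int) == 0 && decide (0 < 2) then 0 + 1 else 0) = 1 := by simp
      rw [hupd, hasGo_one]
      have hidx : PySem.List.index? ((0 : Int) :: r) 0 = some 0 :=
        PySem.List.index?_cons_self 0 r
      have hhead : ((0 : Int) == 0 &&
          (match PySem.List.index? ((0 : Int) :: r) 0 with
           | some idx => Il ((0 : Int) :: r) (idx : Int)
           | none => false)) = Il ((0 : Int) :: r) 0 := by
        rw [hidx]; simp
      rw [hhead]
      have htail : r.any (fun num =>
            num == 0 &&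
              (match PySem.List.index? ((0 : Int) :: r) num with
               | some idx => Il ((0 : Int) :: r) (idx : Int)
               | none => false))
          = r.any (fun num => num == 0 && Il ((0 : Int) :: r) 0) := by
        apply PySem.List.any_congr_mem
        intro num _
        by_cases hn : num == 0
        · have : num = 0 := by simpa using hn
          subst this
          rw [hidx]
          simp
        · simp [hn]
      rw [htail, any_and_const, Il_zero_cons, Gl_eq_zs]
      cases hz : zs r <;> simp
    · -- x ≠ 0: head contributes false; indices in r shift by one and cancel
      have hx0 : x ≠ 0 := by simpa using h0
      have hupd : (if x == 0 && decide (0 < 2) then 0 + 1 else 0) = 0 := by simp [h0]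
      rw [hupd, ← ih, has_eq_any]
      have hhead : (x == 0 &&
          (match PySem.List.index? (x :: r) x with
           | some idx => Il (x :: r) (idx : Int)
           | none => false)) = false := by simp [h0]
      rw [hhead, Bool.false_or]
      apply PySem.List.any_congr_mem
      intro num hnum
      by_cases hn : num == 0
      · have hn' : num = 0 := by simpa using hn
        subst hn'
        have hne : x ≠ (0 : Int) := hx0
        rw [PySem.List.index?_cons_of_ne r hne]
        cases hidx : PySem.List.index? r 0 with
        | none =>
          exact absurd hnum ((PySem.List.index?_eq_none_iff _ _).mp hidx)
        | some k =>
          simp only [Option.map_some]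
          have : ((k + 1 : Nat) : Int) = (k : Int) + 1 := by push_cast; ring
          rw [this, Il_cons x r (k : Int) (by positivity)]
      · simp [hn]

-- ===== VERDICT (by name: the statement is the Claim_ definition above) =====
theorem has_spec : Claim_equal_has := by
  intro nums _
  unfold Spec_has has_alt
  exact has_eq_hasGo nums
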